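-- pv_equiv track=rewrite | github.com/sn8k/Jupiter-project | jupiter/core/callgraph.py | _is_entry_point_decorator
-- ===== SOURCE A (Python) =====
-- ENTRY_POINT_DECORATORS = frozenset({
--     # FastAPI / Starlette
--     "router.get", "router.post", "router.put", "router.delete", "router.patch",
--     "router.websocket", "app.get", "app.post", "app.put", "app.delete",
--     "app.on_event", "app.middleware", "app.exception_handler",
--     # Flask
--     "route", "before_request", "after_request", "errorhandler",
--     # Click / Typer CLI
--     "click.command", "click.group", "command", "group", "callback",
--     "app.command", "typer.command",
--     # Tests
--     "pytest.fixture", "fixture", "pytest.mark",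
--     # Celery
--     "task", "shared_task", "periodic_task",
--     # Django
--     "admin.register", "receiver", "login_required",
--     # ABC
--     "abstractmethod",
-- })
--
-- def _is_entry_point_decorator(dec_name: str) -> bool:
--     """Check if decorator marks an entry point."""
--     if dec_name in ENTRY_POINT_DECORATORS:
--         return True
--     # Partial match for patterns like "my_router.get"
--     for pattern in ENTRY_POINT_DECORATORS:
--         if "." in pattern and dec_name.endswith(pattern):
--             return True
--         parts = pattern.split(".")
--         if len(parts) == 2 and dec_name.endswith(f".{parts[1]}"):
--             return True
--     return False
-- ===== SOURCE B (Python) =====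
-- ENTRY_POINT_DECORATORS = frozenset({
--     # FastAPI / Starlette
--     "router.get", "router.post", "router.put", "router.delete", "router.patch",
--     "router.websocket", "app.get", "app.post", "app.put", "app.delete",
--     "app.on_event", "app.middleware", "app.exception_handler",
--     # Flask
--     "route", "before_request", "after_request", "errorhandler",
--     # Click / Typer CLI
--     "click.command", "click.group", "command", "group", "callback",
--     "app.command", "typer.command",
--     # Tests
--     "pytest.fixture", "fixture", "pytest.mark",
--     # Celery
--     "task", "shared_task", "periodic_task",
--     # Django
--     "admin.register", "receiver", "login_required",
--     # ABC
--     "abstractmethod",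
-- })
--
-- # Second segment of every two-part pattern above.
-- SECOND_PARTS = frozenset({
--     "get", "post", "put", "delete", "patch", "websocket",
--     "on_event", "middleware", "exception_handler",
--     "command", "group", "fixture", "mark", "register",
-- })
--
-- def _is_entry_point_decorator(dec_name: str) -> bool:
--     """Check if decorator marks an entry point."""
--     if dec_name in ENTRY_POINT_DECORATORS:
--         return True
--     if "." not in dec_name:
--         return False
--     # The endswith(".xxx") scan of the original is exactly: last segment in SECOND_PARTS.
--     return dec_name.rsplit(".", 1)[1] in SECOND_PARTS
-- ===== Notes on version B (the rewrite author's own statement) =====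
-- stated objective: simpler
-- what changed: A's linear scan of ENTRY_POINT_DECORATORS with per-pattern split/endswith tests is replaced by extracting the segment after the last dot once and testing membership in a precomputed SECOND_PARTS set (the second segment of every two-part pattern).
import Mathlib
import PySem

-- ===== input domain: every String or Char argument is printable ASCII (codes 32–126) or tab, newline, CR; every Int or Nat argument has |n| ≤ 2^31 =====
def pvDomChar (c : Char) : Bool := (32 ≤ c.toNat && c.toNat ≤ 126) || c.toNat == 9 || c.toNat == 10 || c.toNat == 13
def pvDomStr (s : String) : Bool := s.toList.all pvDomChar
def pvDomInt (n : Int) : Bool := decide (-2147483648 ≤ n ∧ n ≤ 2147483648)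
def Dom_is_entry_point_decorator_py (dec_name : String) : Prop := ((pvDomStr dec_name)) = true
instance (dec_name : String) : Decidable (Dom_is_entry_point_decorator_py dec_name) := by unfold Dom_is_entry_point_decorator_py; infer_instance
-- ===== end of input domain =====

-- B replaces A's linear scan of endswith tests by one suffix extraction (the segment after
-- the last dot) plus a single membership test (objective: simpler).

-- ===== PORT A =====
-- ENTRY_POINT_DECORATORS, in the order of the source literal (a frozenset: the loop's
-- iteration order is arbitrary in Python, and the loop's result is order-independent).
def pvEntryPointDecorators : List String := ["router.get", "router.post", "router.put", "router.delete", "router.patch", "router.websocket", "app.get", "app.post", "app.put", "app.delete", "app.on_event", "app.middleware", "app.exception_handler", "route", "before_request", "after_request", "errorhandler", "click.command", "click.group", "command", "group", "callback", "app.command", "typer.command", "pytest.fixture", "fixture", "pytest.mark", "task", "shared_task", "periodic_task", "admin.register", "receiver", "login_required", "abstractmethod"]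

-- the body of A's for-loop over patterns ("." in pattern and dec_name.endswith(pattern),
-- or pattern splits in two parts and dec_name.endswith("." + parts[1]))
def pvBody (dec_name pattern : String) : Bool :=
  (PySem.Str.isIn "." pattern && PySem.Str.endswith dec_name pattern) ||
  (let parts := PySem.Chars.splitOn pattern.toList ".".toList
   (parts.length == 2 && PySem.Chars.endswith dec_name.toList ('.' :: parts.getD 1 [])))

def is_entry_point_decorator_py (dec_name : String) : Bool :=
  if pvEntryPointDecorators.contains dec_name then
    true
  else
    -- for pattern in ENTRY_POINT_DECORATORS: if <body>: return True
    pvEntryPointDecorators.any (fun pattern => pvBody dec_name pattern)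

-- ===== PORT B =====
def pvEntryPointDecoratorsB : List String := ["router.get", "router.post", "router.put", "router.delete", "router.patch", "router.websocket", "app.get", "app.post", "app.put", "app.delete", "app.on_event", "app.middleware", "app.exception_handler", "route", "before_request", "after_request", "errorhandler", "click.command", "click.group", "command", "group", "callback", "app.command", "typer.command", "pytest.fixture", "fixture", "pytest.mark", "task", "shared_task", "periodic_task", "admin.register", "receiver", "login_required", "abstractmethod"]

-- SECOND_PARTS: the second segment of every two-part pattern (code-point lists)
def pvSecondParts : List (List Char) := ["get".toList, "post".toList, "put".toList, "delete".toList, "patch".toList, "websocket".toList, "on_event".toList, "middleware".toList, "exception_handler".toList, "command".toList, "group".toList, "fixture".toList, "mark".toList, "register".toList]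

-- hand port of dec_name.rsplit(".", 1)[1]: the code points after the LAST '.';
-- exact whenever '.' occurs in dec_name, the only case B evaluates it
def pvLastSegment (dec_name : String) : List Char :=
  (dec_name.toList.reverse.takeWhile (fun c => c ≠ '.')).reverse

def is_entry_point_decorator_py_alt (dec_name : String) : Bool :=
  if pvEntryPointDecoratorsB.contains dec_name then
    true
  else if PySem.Str.isIn "." dec_name = false then
    false
  else
    pvSecondParts.contains (pvLastSegment dec_name)

-- ===== PRECONDITION & SPEC =====
def Spec_is_entry_point_decorator_py (dec_name : String) (out : Bool) : Prop := out = is_entry_point_decorator_py_alt dec_name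
instance (dec_name : String) (out : Bool) : Decidable (Spec_is_entry_point_decorator_py dec_name out) := by unfold Spec_is_entry_point_decorator_py; infer_instance

-- ===== CLAIM (what is proved, stated in full; the proofs are below) =====
def Claim_equal_is_entry_point_decorator_py : Prop := ∀ (dec_name : String), Dom_is_entry_point_decorator_py dec_name → Spec_is_entry_point_decorator_py dec_name (is_entry_point_decorator_py dec_name)

-- ===== LEMMAS AND PROOFS =====

-- a chunk "z then '.'" is a prefix of r (z dot-free) iff r starts with z followed by '.'
theorem pvCore (z r : List Char) (hz : '.' ∉ z) :
    (z.reverse ++ ['.'] <+: r) ↔ ('.' ∈ r ∧ r.takeWhile (fun c => c ≠ '.') = z.reverse) := by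
  constructor
  · rintro ⟨t, ht⟩
    have hr : r = z.reverse ++ '.' :: t := by simpa using ht.symm
    subst hr
    refine ⟨by simp, ?_⟩
    rw [List.takeWhile_append_of_pos]
    · simp
    · intro c hc
      simp only [List.mem_reverse] at hc
      simp only [decide_eq_true_eq]
      intro h; exact hz (h ▸ hc)
  · rintro ⟨hmem, htw⟩
    have hsplit := List.takeWhile_append_dropWhile (p := fun c => (c ≠ '.' : Bool)) (l := r)
    obtain ⟨c, d', hcd⟩ : ∃ c d', r.dropWhile (fun c => (c ≠ '.' : Bool)) = c :: d' := by
      refine List.exists_cons_of_ne_nil ?_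
      intro h
      rw [h, List.append_nil, htw] at hsplit
      rw [← hsplit] at hmem
      simp at hmem
      exact hz hmem
    have hc : c = '.' := by
      have h2 := List.head_dropWhile_not (p := fun c => (c ≠ '.' : Bool)) (l := r)
        (by rw [hcd]; simp)
      simp only [hcd, List.head_cons, decide_eq_false_iff_not, not_not] at h2
      exact h2
    refine ⟨d', ?_⟩
    rw [← hsplit, htw, hcd, hc]
    simp

-- s ends with '.' ++ z (z dot-free) iff '.' occurs in s and the segment after the last '.' is z
theorem pvEndsDot (z : List Char) (hz : '.' ∉ z) (s : List Char) :
    PySem.Chars.endswith s ('.' :: z)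
    = (PySem.Chars.isIn ['.'] s && ((s.reverse.takeWhile (fun c => c ≠ '.')).reverse == z)) := by
  rw [Bool.eq_iff_iff]
  simp only [Bool.and_eq_true, beq_iff_eq, PySem.Chars.endswith_iff, PySem.Chars.isIn_iff_infix,
    List.singleton_infix_iff, List.reverse_eq_iff]
  rw [← List.reverse_prefix]
  simp only [List.reverse_cons]
  rw [pvCore z s.reverse hz]
  simp

-- absorb the full-pattern endswith into the ".second" endswith
theorem pvEndsAbsorb (x z s : List Char) :
    (PySem.Chars.endswith s (x ++ z) || PySem.Chars.endswith s z) = PySem.Chars.endswith s z := by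
  cases h : PySem.Chars.endswith s z
  · rw [Bool.or_false]
    rw [Bool.eq_false_iff] at h ⊢
    intro hxz
    exact h (PySem.Chars.endswith_iff s z |>.mpr
      ((List.suffix_append x z).trans ((PySem.Chars.endswith_iff s (x ++ z)).mp hxz)))
  · simp

theorem pvBody_0 (s : String) : pvBody s "router.get" = PySem.Chars.endswith s.toList ('.' :: "get".toList) := by
  simp only [pvBody, PySem.Str.endswith_eq,
    show PySem.Str.isIn "." "router.get" = true from by decide,
    show PySem.Chars.splitOn "router.get".toList ".".toList = ["router".toList, "get".toList] from by decide,
    List.length_cons, List.length_nil, List.getD_cons_succ, List.getD_cons_zero,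
    Bool.true_and, beq_self_eq_true]
  exact pvEndsAbsorb "router".toList ('.' :: "get".toList) s.toList

theorem pvBody_1 (s : String) : pvBody s "router.post" = PySem.Chars.endswith s.toList ('.' :: "post".toList) := by
  simp only [pvBody, PySem.Str.endswith_eq,
    show PySem.Str.isIn "." "router.post" = true from by decide,
    show PySem.Chars.splitOn "router.post".toList ".".toList = ["router".toList, "post".toList] from by decide,
    List.length_cons, List.length_nil, List.getD_cons_succ, List.getD_cons_zero,
    Bool.true_and, beq_self_eq_true]
  exact pvEndsAbsorb "router".toList ('.' :: "post".toList) s.toList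

theorem pvBody_2 (s : String) : pvBody s "router.put" = PySem.Chars.endswith s.toList ('.' :: "put".toList) := by
  simp only [pvBody, PySem.Str.endswith_eq,
    show PySem.Str.isIn "." "router.put" = true from by decide,
    show PySem.Chars.splitOn "router.put".toList ".".toList = ["router".toList, "put".toList] from by decide,
    List.length_cons, List.length_nil, List.getD_cons_succ, List.getD_cons_zero,
    Bool.true_and, beq_self_eq_true]
  exact pvEndsAbsorb "router".toList ('.' :: "put".toList) s.toList

theorem pvBody_3 (s : String) : pvBody s "router.delete" = PySem.Chars.endswith s.toList ('.' :: "delete".toList) := by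
  simp only [pvBody, PySem.Str.endswith_eq,
    show PySem.Str.isIn "." "router.delete" = true from by decide,
    show PySem.Chars.splitOn "router.delete".toList ".".toList = ["router".toList, "delete".toList] from by decide,
    List.length_cons, List.length_nil, List.getD_cons_succ, List.getD_cons_zero,
    Bool.true_and, beq_self_eq_true]
  exact pvEndsAbsorb "router".toList ('.' :: "delete".toList) s.toList

theorem pvBody_4 (s : String) : pvBody s "router.patch" = PySem.Chars.endswith s.toList ('.' :: "patch".toList) := by
  simp only [pvBody, PySem.Str.endswith_eq,
    show PySem.Str.isIn "." "router.patch" = true from by decide,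
    show PySem.Chars.splitOn "router.patch".toList ".".toList = ["router".toList, "patch".toList] from by decide,
    List.length_cons, List.length_nil, List.getD_cons_succ, List.getD_cons_zero,
    Bool.true_and, beq_self_eq_true]
  exact pvEndsAbsorb "router".toList ('.' :: "patch".toList) s.toList

theorem pvBody_5 (s : String) : pvBody s "router.websocket" = PySem.Chars.endswith s.toList ('.' :: "websocket".toList) := by
  simp only [pvBody, PySem.Str.endswith_eq,
    show PySem.Str.isIn "." "router.websocket" = true from by decide,
    show PySem.Chars.splitOn "router.websocket".toList ".".toList = ["router".toList, "websocket".toList] from by decide,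
    List.length_cons, List.length_nil, List.getD_cons_succ, List.getD_cons_zero,
    Bool.true_and, beq_self_eq_true]
  exact pvEndsAbsorb "router".toList ('.' :: "websocket".toList) s.toList

theorem pvBody_6 (s : String) : pvBody s "app.get" = PySem.Chars.endswith s.toList ('.' :: "get".toList) := by
  simp only [pvBody, PySem.Str.endswith_eq,
    show PySem.Str.isIn "." "app.get" = true from by decide,
    show PySem.Chars.splitOn "app.get".toList ".".toList = ["app".toList, "get".toList] from by decide,
    List.length_cons, List.length_nil, List.getD_cons_succ, List.getD_cons_zero,
    Bool.true_and, beq_self_eq_true]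
  exact pvEndsAbsorb "app".toList ('.' :: "get".toList) s.toList

theorem pvBody_7 (s : String) : pvBody s "app.post" = PySem.Chars.endswith s.toList ('.' :: "post".toList) := by
  simp only [pvBody, PySem.Str.endswith_eq,
    show PySem.Str.isIn "." "app.post" = true from by decide,
    show PySem.Chars.splitOn "app.post".toList ".".toList = ["app".toList, "post".toList] from by decide,
    List.length_cons, List.length_nil, List.getD_cons_succ, List.getD_cons_zero,
    Bool.true_and, beq_self_eq_true]
  exact pvEndsAbsorb "app".toList ('.' :: "post".toList) s.toList

theorem pvBody_8 (s : String) : pvBody s "app.put" = PySem.Chars.endswith s.toList ('.' :: "put".toList) := by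
  simp only [pvBody, PySem.Str.endswith_eq,
    show PySem.Str.isIn "." "app.put" = true from by decide,
    show PySem.Chars.splitOn "app.put".toList ".".toList = ["app".toList, "put".toList] from by decide,
    List.length_cons, List.length_nil, List.getD_cons_succ, List.getD_cons_zero,
    Bool.true_and, beq_self_eq_true]
  exact pvEndsAbsorb "app".toList ('.' :: "put".toList) s.toList

theorem pvBody_9 (s : String) : pvBody s "app.delete" = PySem.Chars.endswith s.toList ('.' :: "delete".toList) := by
  simp only [pvBody, PySem.Str.endswith_eq,
    show PySem.Str.isIn "." "app.delete" = true from by decide,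
    show PySem.Chars.splitOn "app.delete".toList ".".toList = ["app".toList, "delete".toList] from by decide,
    List.length_cons, List.length_nil, List.getD_cons_succ, List.getD_cons_zero,
    Bool.true_and, beq_self_eq_true]
  exact pvEndsAbsorb "app".toList ('.' :: "delete".toList) s.toList

theorem pvBody_10 (s : String) : pvBody s "app.on_event" = PySem.Chars.endswith s.toList ('.' :: "on_event".toList) := by
  simp only [pvBody, PySem.Str.endswith_eq,
    show PySem.Str.isIn "." "app.on_event" = true from by decide,
    show PySem.Chars.splitOn "app.on_event".toList ".".toList = ["app".toList, "on_event".toList] from by decide,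
    List.length_cons, List.length_nil, List.getD_cons_succ, List.getD_cons_zero,
    Bool.true_and, beq_self_eq_true]
  exact pvEndsAbsorb "app".toList ('.' :: "on_event".toList) s.toList

theorem pvBody_11 (s : String) : pvBody s "app.middleware" = PySem.Chars.endswith s.toList ('.' :: "middleware".toList) := by
  simp only [pvBody, PySem.Str.endswith_eq,
    show PySem.Str.isIn "." "app.middleware" = true from by decide,
    show PySem.Chars.splitOn "app.middleware".toList ".".toList = ["app".toList, "middleware".toList] from by decide,
    List.length_cons, List.length_nil, List.getD_cons_succ, List.getD_cons_zero,
    Bool.true_and, beq_self_eq_true]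
  exact pvEndsAbsorb "app".toList ('.' :: "middleware".toList) s.toList

theorem pvBody_12 (s : String) : pvBody s "app.exception_handler" = PySem.Chars.endswith s.toList ('.' :: "exception_handler".toList) := by
  simp only [pvBody, PySem.Str.endswith_eq,
    show PySem.Str.isIn "." "app.exception_handler" = true from by decide,
    show PySem.Chars.splitOn "app.exception_handler".toList ".".toList = ["app".toList, "exception_handler".toList] from by decide,
    List.length_cons, List.length_nil, List.getD_cons_succ, List.getD_cons_zero,
    Bool.true_and, beq_self_eq_true]
  exact pvEndsAbsorb "app".toList ('.' :: "exception_handler".toList) s.toList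

theorem pvBody_13 (s : String) : pvBody s "route" = false := by
  simp only [pvBody,
    show PySem.Str.isIn "." "route" = false from by decide,
    show PySem.Chars.splitOn "route".toList ".".toList = ["route".toList] from by decide,
    List.length_cons, List.length_nil, Bool.false_and, Bool.false_or]
  simp

theorem pvBody_14 (s : String) : pvBody s "before_request" = false := by
  simp only [pvBody,
    show PySem.Str.isIn "." "before_request" = false from by decide,
    show PySem.Chars.splitOn "before_request".toList ".".toList = ["before_request".toList] from by decide,
    List.length_cons, List.length_nil, Bool.false_and, Bool.false_or]
  simp

theorem pvBody_15 (s : String) : pvBody s "after_request" = false := by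
  simp only [pvBody,
    show PySem.Str.isIn "." "after_request" = false from by decide,
    show PySem.Chars.splitOn "after_request".toList ".".toList = ["after_request".toList] from by decide,
    List.length_cons, List.length_nil, Bool.false_and, Bool.false_or]
  simp

theorem pvBody_16 (s : String) : pvBody s "errorhandler" = false := by
  simp only [pvBody,
    show PySem.Str.isIn "." "errorhandler" = false from by decide,
    show PySem.Chars.splitOn "errorhandler".toList ".".toList = ["errorhandler".toList] from by decide,
    List.length_cons, List.length_nil, Bool.false_and, Bool.false_or]
  simp

theorem pvBody_17 (s : String) : pvBody s "click.command" = PySem.Chars.endswith s.toList ('.' :: "command".toList) := by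
  simp only [pvBody, PySem.Str.endswith_eq,
    show PySem.Str.isIn "." "click.command" = true from by decide,
    show PySem.Chars.splitOn "click.command".toList ".".toList = ["click".toList, "command".toList] from by decide,
    List.length_cons, List.length_nil, List.getD_cons_succ, List.getD_cons_zero,
    Bool.true_and, beq_self_eq_true]
  exact pvEndsAbsorb "click".toList ('.' :: "command".toList) s.toList

theorem pvBody_18 (s : String) : pvBody s "click.group" = PySem.Chars.endswith s.toList ('.' :: "group".toList) := by
  simp only [pvBody, PySem.Str.endswith_eq,
    show PySem.Str.isIn "." "click.group" = true from by decide,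
    show PySem.Chars.splitOn "click.group".toList ".".toList = ["click".toList, "group".toList] from by decide,
    List.length_cons, List.length_nil, List.getD_cons_succ, List.getD_cons_zero,
    Bool.true_and, beq_self_eq_true]
  exact pvEndsAbsorb "click".toList ('.' :: "group".toList) s.toList

theorem pvBody_19 (s : String) : pvBody s "command" = false := by
  simp only [pvBody,
    show PySem.Str.isIn "." "command" = false from by decide,
    show PySem.Chars.splitOn "command".toList ".".toList = ["command".toList] from by decide,
    List.length_cons, List.length_nil, Bool.false_and, Bool.false_or]
  simp

theorem pvBody_20 (s : String) : pvBody s "group" = false := by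
  simp only [pvBody,
    show PySem.Str.isIn "." "group" = false from by decide,
    show PySem.Chars.splitOn "group".toList ".".toList = ["group".toList] from by decide,
    List.length_cons, List.length_nil, Bool.false_and, Bool.false_or]
  simp

theorem pvBody_21 (s : String) : pvBody s "callback" = false := by
  simp only [pvBody,
    show PySem.Str.isIn "." "callback" = false from by decide,
    show PySem.Chars.splitOn "callback".toList ".".toList = ["callback".toList] from by decide,
    List.length_cons, List.length_nil, Bool.false_and, Bool.false_or]
  simp

theorem pvBody_22 (s : String) : pvBody s "app.command" = PySem.Chars.endswith s.toList ('.' :: "command".toList) := by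
  simp only [pvBody, PySem.Str.endswith_eq,
    show PySem.Str.isIn "." "app.command" = true from by decide,
    show PySem.Chars.splitOn "app.command".toList ".".toList = ["app".toList, "command".toList] from by decide,
    List.length_cons, List.length_nil, List.getD_cons_succ, List.getD_cons_zero,
    Bool.true_and, beq_self_eq_true]
  exact pvEndsAbsorb "app".toList ('.' :: "command".toList) s.toList

theorem pvBody_23 (s : String) : pvBody s "typer.command" = PySem.Chars.endswith s.toList ('.' :: "command".toList) := by
  simp only [pvBody, PySem.Str.endswith_eq,
    show PySem.Str.isIn "." "typer.command" = true from by decide,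
    show PySem.Chars.splitOn "typer.command".toList ".".toList = ["typer".toList, "command".toList] from by decide,
    List.length_cons, List.length_nil, List.getD_cons_succ, List.getD_cons_zero,
    Bool.true_and, beq_self_eq_true]
  exact pvEndsAbsorb "typer".toList ('.' :: "command".toList) s.toList

theorem pvBody_24 (s : String) : pvBody s "pytest.fixture" = PySem.Chars.endswith s.toList ('.' :: "fixture".toList) := by
  simp only [pvBody, PySem.Str.endswith_eq,
    show PySem.Str.isIn "." "pytest.fixture" = true from by decide,
    show PySem.Chars.splitOn "pytest.fixture".toList ".".toList = ["pytest".toList, "fixture".toList] from by decide,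
    List.length_cons, List.length_nil, List.getD_cons_succ, List.getD_cons_zero,
    Bool.true_and, beq_self_eq_true]
  exact pvEndsAbsorb "pytest".toList ('.' :: "fixture".toList) s.toList

theorem pvBody_25 (s : String) : pvBody s "fixture" = false := by
  simp only [pvBody,
    show PySem.Str.isIn "." "fixture" = false from by decide,
    show PySem.Chars.splitOn "fixture".toList ".".toList = ["fixture".toList] from by decide,
    List.length_cons, List.length_nil, Bool.false_and, Bool.false_or]
  simp

theorem pvBody_26 (s : String) : pvBody s "pytest.mark" = PySem.Chars.endswith s.toList ('.' :: "mark".toList) := by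
  simp only [pvBody, PySem.Str.endswith_eq,
    show PySem.Str.isIn "." "pytest.mark" = true from by decide,
    show PySem.Chars.splitOn "pytest.mark".toList ".".toList = ["pytest".toList, "mark".toList] from by decide,
    List.length_cons, List.length_nil, List.getD_cons_succ, List.getD_cons_zero,
    Bool.true_and, beq_self_eq_true]
  exact pvEndsAbsorb "pytest".toList ('.' :: "mark".toList) s.toList

theorem pvBody_27 (s : String) : pvBody s "task" = false := by
  simp only [pvBody,
    show PySem.Str.isIn "." "task" = false from by decide,
    show PySem.Chars.splitOn "task".toList ".".toList = ["task".toList] from by decide,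
    List.length_cons, List.length_nil, Bool.false_and, Bool.false_or]
  simp

theorem pvBody_28 (s : String) : pvBody s "shared_task" = false := by
  simp only [pvBody,
    show PySem.Str.isIn "." "shared_task" = false from by decide,
    show PySem.Chars.splitOn "shared_task".toList ".".toList = ["shared_task".toList] from by decide,
    List.length_cons, List.length_nil, Bool.false_and, Bool.false_or]
  simp

theorem pvBody_29 (s : String) : pvBody s "periodic_task" = false := by
  simp only [pvBody,
    show PySem.Str.isIn "." "periodic_task" = false from by decide,
    show PySem.Chars.splitOn "periodic_task".toList ".".toList = ["periodic_task".toList] from by decide,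
    List.length_cons, List.length_nil, Bool.false_and, Bool.false_or]
  simp

theorem pvBody_30 (s : String) : pvBody s "admin.register" = PySem.Chars.endswith s.toList ('.' :: "register".toList) := by
  simp only [pvBody, PySem.Str.endswith_eq,
    show PySem.Str.isIn "." "admin.register" = true from by decide,
    show PySem.Chars.splitOn "admin.register".toList ".".toList = ["admin".toList, "register".toList] from by decide,
    List.length_cons, List.length_nil, List.getD_cons_succ, List.getD_cons_zero,
    Bool.true_and, beq_self_eq_true]
  exact pvEndsAbsorb "admin".toList ('.' :: "register".toList) s.toList

theorem pvBody_31 (s : String) : pvBody s "receiver" = false := by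
  simp only [pvBody,
    show PySem.Str.isIn "." "receiver" = false from by decide,
    show PySem.Chars.splitOn "receiver".toList ".".toList = ["receiver".toList] from by decide,
    List.length_cons, List.length_nil, Bool.false_and, Bool.false_or]
  simp

theorem pvBody_32 (s : String) : pvBody s "login_required" = false := by
  simp only [pvBody,
    show PySem.Str.isIn "." "login_required" = false from by decide,
    show PySem.Chars.splitOn "login_required".toList ".".toList = ["login_required".toList] from by decide,
    List.length_cons, List.length_nil, Bool.false_and, Bool.false_or]
  simp

theorem pvBody_33 (s : String) : pvBody s "abstractmethod" = false := by
  simp only [pvBody,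
    show PySem.Str.isIn "." "abstractmethod" = false from by decide,
    show PySem.Chars.splitOn "abstractmethod".toList ".".toList = ["abstractmethod".toList] from by decide,
    List.length_cons, List.length_nil, Bool.false_and, Bool.false_or]
  simp

theorem pvDot_0 (s : List Char) :
    (PySem.Chars.isIn ['.'] s && ((s.reverse.takeWhile (fun c => c ≠ '.')).reverse == "get".toList)) = PySem.Chars.endswith s ('.' :: "get".toList) :=
  (pvEndsDot "get".toList (by decide) s).symm
theorem pvDot_1 (s : List Char) :
    (PySem.Chars.isIn ['.'] s && ((s.reverse.takeWhile (fun c => c ≠ '.')).reverse == "post".toList)) = PySem.Chars.endswith s ('.' :: "post".toList) :=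
  (pvEndsDot "post".toList (by decide) s).symm
theorem pvDot_2 (s : List Char) :
    (PySem.Chars.isIn ['.'] s && ((s.reverse.takeWhile (fun c => c ≠ '.')).reverse == "put".toList)) = PySem.Chars.endswith s ('.' :: "put".toList) :=
  (pvEndsDot "put".toList (by decide) s).symm
theorem pvDot_3 (s : List Char) :
    (PySem.Chars.isIn ['.'] s && ((s.reverse.takeWhile (fun c => c ≠ '.')).reverse == "delete".toList)) = PySem.Chars.endswith s ('.' :: "delete".toList) :=
  (pvEndsDot "delete".toList (by decide) s).symm
theorem pvDot_4 (s : List Char) :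
    (PySem.Chars.isIn ['.'] s && ((s.reverse.takeWhile (fun c => c ≠ '.')).reverse == "patch".toList)) = PySem.Chars.endswith s ('.' :: "patch".toList) :=
  (pvEndsDot "patch".toList (by decide) s).symm
theorem pvDot_5 (s : List Char) :
    (PySem.Chars.isIn ['.'] s && ((s.reverse.takeWhile (fun c => c ≠ '.')).reverse == "websocket".toList)) = PySem.Chars.endswith s ('.' :: "websocket".toList) :=
  (pvEndsDot "websocket".toList (by decide) s).symm
theorem pvDot_6 (s : List Char) :
    (PySem.Chars.isIn ['.'] s && ((s.reverse.takeWhile (fun c => c ≠ '.')).reverse == "on_event".toList)) = PySem.Chars.endswith s ('.' :: "on_event".toList) :=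
  (pvEndsDot "on_event".toList (by decide) s).symm
theorem pvDot_7 (s : List Char) :
    (PySem.Chars.isIn ['.'] s && ((s.reverse.takeWhile (fun c => c ≠ '.')).reverse == "middleware".toList)) = PySem.Chars.endswith s ('.' :: "middleware".toList) :=
  (pvEndsDot "middleware".toList (by decide) s).symm
theorem pvDot_8 (s : List Char) :
    (PySem.Chars.isIn ['.'] s && ((s.reverse.takeWhile (fun c => c ≠ '.')).reverse == "exception_handler".toList)) = PySem.Chars.endswith s ('.' :: "exception_handler".toList) :=
  (pvEndsDot "exception_handler".toList (by decide) s).symm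
theorem pvDot_9 (s : List Char) :
    (PySem.Chars.isIn ['.'] s && ((s.reverse.takeWhile (fun c => c ≠ '.')).reverse == "command".toList)) = PySem.Chars.endswith s ('.' :: "command".toList) :=
  (pvEndsDot "command".toList (by decide) s).symm
theorem pvDot_10 (s : List Char) :
    (PySem.Chars.isIn ['.'] s && ((s.reverse.takeWhile (fun c => c ≠ '.')).reverse == "group".toList)) = PySem.Chars.endswith s ('.' :: "group".toList) :=
  (pvEndsDot "group".toList (by decide) s).symm
theorem pvDot_11 (s : List Char) :
    (PySem.Chars.isIn ['.'] s && ((s.reverse.takeWhile (fun c => c ≠ '.')).reverse == "fixture".toList)) = PySem.Chars.endswith s ('.' :: "fixture".toList) :=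
  (pvEndsDot "fixture".toList (by decide) s).symm
theorem pvDot_12 (s : List Char) :
    (PySem.Chars.isIn ['.'] s && ((s.reverse.takeWhile (fun c => c ≠ '.')).reverse == "mark".toList)) = PySem.Chars.endswith s ('.' :: "mark".toList) :=
  (pvEndsDot "mark".toList (by decide) s).symm
theorem pvDot_13 (s : List Char) :
    (PySem.Chars.isIn ['.'] s && ((s.reverse.takeWhile (fun c => c ≠ '.')).reverse == "register".toList)) = PySem.Chars.endswith s ('.' :: "register".toList) :=
  (pvEndsDot "register".toList (by decide) s).symm

theorem pvLoopEq (s : String) :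
    pvEntryPointDecorators.any (fun pattern => pvBody s pattern)
    = (if PySem.Str.isIn "." s = false then false
       else pvSecondParts.contains (pvLastSegment s)) := by
  have hiib : PySem.Str.isIn "." s = PySem.Chars.isIn ['.'] s.toList := by
    rw [PySem.Str.isIn_eq]; rfl
  simp only [pvEntryPointDecorators, List.any_cons, List.any_nil,
    pvBody_0, pvBody_1, pvBody_2, pvBody_3, pvBody_4, pvBody_5, pvBody_6, pvBody_7, pvBody_8, pvBody_9, pvBody_10, pvBody_11, pvBody_12, pvBody_13, pvBody_14, pvBody_15, pvBody_16, pvBody_17, pvBody_18, pvBody_19, pvBody_20, pvBody_21, pvBody_22, pvBody_23, pvBody_24, pvBody_25, pvBody_26, pvBody_27, pvBody_28, pvBody_29, pvBody_30, pvBody_31, pvBody_32, pvBody_33, Bool.or_false, Bool.false_or]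
  simp only [pvSecondParts, pvLastSegment, List.contains_cons, List.contains_nil]
  cases h : PySem.Chars.isIn ['.'] s.toList
  · rw [hiib, h]
    simp only [← pvDot_0, ← pvDot_1, ← pvDot_2, ← pvDot_3, ← pvDot_4, ← pvDot_5, ← pvDot_6, ← pvDot_7, ← pvDot_8, ← pvDot_9, ← pvDot_10, ← pvDot_11, ← pvDot_12, ← pvDot_13, h, Bool.false_and, Bool.or_false]
    simp
  · rw [hiib, h]
    simp only [if_neg (by decide : ¬ (true = false))]
    simp only [← pvDot_0, ← pvDot_1, ← pvDot_2, ← pvDot_3, ← pvDot_4, ← pvDot_5, ← pvDot_6, ← pvDot_7, ← pvDot_8, ← pvDot_9, ← pvDot_10, ← pvDot_11, ← pvDot_12, ← pvDot_13, h, Bool.true_and, Bool.or_false]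
    generalize ((s.toList.reverse.takeWhile (fun c => c ≠ '.')).reverse == "get".toList) = b0
    generalize ((s.toList.reverse.takeWhile (fun c => c ≠ '.')).reverse == "post".toList) = b1
    generalize ((s.toList.reverse.takeWhile (fun c => c ≠ '.')).reverse == "put".toList) = b2
    generalize ((s.toList.reverse.takeWhile (fun c => c ≠ '.')).reverse == "delete".toList) = b3
    generalize ((s.toList.reverse.takeWhile (fun c => c ≠ '.')).reverse == "patch".toList) = b4
    generalize ((s.toList.reverse.takeWhile (fun c => c ≠ '.')).reverse == "websocket".toList) = b5
    generalize ((s.toList.reverse.takeWhile (fun c => c ≠ '.')).reverse == "on_event".toList) = b6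
    generalize ((s.toList.reverse.takeWhile (fun c => c ≠ '.')).reverse == "middleware".toList) = b7
    generalize ((s.toList.reverse.takeWhile (fun c => c ≠ '.')).reverse == "exception_handler".toList) = b8
    generalize ((s.toList.reverse.takeWhile (fun c => c ≠ '.')).reverse == "command".toList) = b9
    generalize ((s.toList.reverse.takeWhile (fun c => c ≠ '.')).reverse == "group".toList) = b10
    generalize ((s.toList.reverse.takeWhile (fun c => c ≠ '.')).reverse == "fixture".toList) = b11
    generalize ((s.toList.reverse.takeWhile (fun c => c ≠ '.')).reverse == "mark".toList) = b12
    generalize ((s.toList.reverse.takeWhile (fun c => c ≠ '.')).reverse == "register".toList) = b13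
    revert b0 b1 b2 b3 b4 b5 b6 b7 b8 b9 b10 b11 b12 b13
    decide

-- ===== VERDICT (by name: the statement is the Claim_ definition above) =====
theorem is_entry_point_decorator_py_spec : Claim_equal_is_entry_point_decorator_py := by
  intro dec_name _
  unfold Spec_is_entry_point_decorator_py
  unfold is_entry_point_decorator_py is_entry_point_decorator_py_alt
  rw [show pvEntryPointDecoratorsB = pvEntryPointDecorators from rfl]
  by_cases hc : pvEntryPointDecorators.contains dec_name = true
  · rw [if_pos hc, if_pos hc]
  · rw [if_neg hc, if_neg hc]
    exact pvLoopEq dec_name
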